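-- pv_equiv track=rewrite | github.com/gustino7/DES-client-server-encryption | client.py | DES_Encrypt
-- ===== SOURCE A (Python) =====
-- def DES_Encrypt(msg):
--     plaintext_block_size = 8
--     plaintext_initial_permutation = (2, 6, 3, 1, 4, 8, 5, 7)
--     plaintext_expansion_permutation = (4, 1, 2, 3, 2, 3, 4, 1)
--     substitution_box_0 =[[1, 0, 3, 2],
--                          [3, 2, 1, 0],
--                          [0, 2, 1, 3],
--                          [3, 1, 3, 2]]
--     substitution_box_1 =[[0, 1, 2, 3],
--                          [2, 0, 1, 3],
--                          [3, 0, 1, 0],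
--                          [2, 1, 0, 3]]
--     right_half_permutation_box = (2, 4, 3, 1)
--     inverse_initial_permutation = (4, 1, 3, 5, 7, 2, 8, 6)
--
--     plaintext = msg.rstrip()
--     key = 523
--     subkeys = generate_subkeys(key)
--     permuted_plaintext = []
--
--     for i in plaintext :
--         binary_plaintext = format(ord(i), "0{}b".format(plaintext_block_size))
--         permuted_plaintext.append(__get_permuted_value(binary_plaintext, plaintext_initial_permutation))
--
--     k = 0
--     for key in subkeys :
--         i = 0
--         for block in permuted_plaintext :
--             left_half = block[:4]
--             right_half = block[4:]
--             new_left_half = right_half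
--
--             right_half = __get_permuted_value(right_half, plaintext_expansion_permutation)
--             temp = xor_operation(int(right_half, 2), int(key, 2))
--             right_half = format(temp, "0{}b".format(len(block)))
--
--             right_half = __perform_substitution(right_half[:4], substitution_box_0) + \
--                             __perform_substitution(right_half[4:], substitution_box_1)
--
--             right_half = __get_permuted_value(right_half, right_half_permutation_box)
--
--             temp = xor_operation(int(right_half, 2), int(left_half, 2))
--             new_right_half = format(temp, "0{}b".format(int(len(block)/2)))
--
--             if (k == len(subkeys) - 1) :
--                 permuted_plaintext[i] = new_right_half + new_left_half
--             else :
--                 permuted_plaintext[i] = new_left_half + new_right_half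
--             i += 1
--         k += 1
--     ciphertext = []
--     for block in permuted_plaintext :
--         ciphertext.append(__get_permuted_value(block, inverse_initial_permutation))
--
--     result = "".join(ciphertext)
--     return result
--
-- def generate_subkeys(key):
--     key_size = 10
--     subkey_initial_permutation = (3, 5, 2, 7, 4, 10, 1, 9, 8, 6)
--     subkey_compression_permutation = (6, 3, 7, 4, 8, 5, 10, 9)
--     no_of_rounds = 16
--     key_shift_values = (2, 1)
--     key = format(key, "0{}b".format(key_size))
--     permuted_key = __get_permuted_value(key, subkey_initial_permutation)
--     all_subkeys = []
--
--     for i in range(no_of_rounds) :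
--         left_half = permuted_key[:int(key_size/2)]
--         right_half = permuted_key[int(key_size/2):]
--
--         left_half = format(circular_left_shift(int(left_half, 2), key_shift_values[i%2], int(key_size/2)), \
--                             "0{}b".format(int(key_size/2)))
--         right_half = format(circular_left_shift(int(right_half, 2), key_shift_values[i%2], int(key_size/2)), \
--                             "0{}b".format(int(key_size/2)))
--
--         merged_halfs = left_half + right_half
--         all_subkeys.append(__get_permuted_value(merged_halfs, subkey_compression_permutation))
--         permuted_key = merged_halfs
--     return all_subkeys
--
-- def __get_permuted_value(data, permutation) :
--         permuted_value = []
--         for i in permutation :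
--             permuted_value.append(data[i - 1])
--         return("".join(permuted_value))
--
-- def circular_left_shift(num, shift_amount, size_of_shift_register) :
--         binary_rep = "{0:0{1}b}".format(num, size_of_shift_register)
--         shift_amount = shift_amount % size_of_shift_register
--         ans = binary_rep[shift_amount:] + binary_rep[:shift_amount]
--         return int(ans, 2)
--
-- def xor_operation(a, b) :
--         return a ^ b
--
-- def __perform_substitution(data, sub_box) :
--         row_number = int(data[0] + data[3], 2)
--         column_number = int(data[1] + data[2], 2)
--         return format(sub_box[row_number][column_number], "02b")
-- ===== SOURCE B (Python) =====
-- # Fixed key (523) => the cipher is a fixed bijection on 8-bit blocks; B replaces the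
-- # whole Feistel machinery with that mapping precomputed once as a 256-entry table:
-- # one lookup per character, no rounds, no key schedule.
--
-- _CIPHER_TABLE = (
--     "00001010", "11101011", "00100111", "11100010", "10011001", "11100100", "00000110", "01110011",
--     "00100010", "10000110", "10100011", "00011000", "10001101", "11111100", "11011001", "00000010",
--     "10100000", "00001101", "00101010", "11101111", "10001111", "11110101", "01000001", "00001011",
--     "01100101", "00011001", "01011110", "10011110", "01111000", "11111010", "00011011", "00111010",
--     "01010100", "00101101", "10010101", "11011010", "11111001", "11010110", "11000011", "11100101",
--     "10100010", "00000000", "10011010", "10001010", "01100000", "00100110", "00100100", "11111111",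
--     "01001110", "01111001", "10110000", "00110010", "11100011", "10010001", "10101101", "01111101",
--     "00100000", "01101010", "00110001", "00111111", "11001010", "11110001", "01111111", "10100110",
--     "01010001", "10110011", "10010010", "10111010", "10010111", "00010000", "10001000", "00011100",
--     "11101110", "01010101", "11111011", "01010010", "01001100", "10000001", "11010010", "11011000",
--     "11110111", "11010101", "00101100", "10101001", "01110101", "00001110", "01110001", "10011101",
--     "00011111", "00010010", "11001000", "11011100", "01000000", "00001001", "00101110", "10011100",
--     "01010110", "00011101", "01001010", "11001101", "01001000", "10111101", "01000101", "10101010",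
--     "10111110", "10110101", "10110111", "00110011", "10100001", "11101010", "00110100", "10101011",
--     "11110011", "00100001", "01001101", "11011110", "11001100", "10111011", "01011001", "01100110",
--     "11000000", "11010100", "10101110", "00101111", "10111001", "01101011", "00100101", "10101111",
--     "11101000", "01101001", "11000010", "01100111", "11011011", "11110010", "11001001", "00111101",
--     "11010000", "10000000", "11001011", "11100001", "01101110", "11100111", "00100011", "10101000",
--     "10111100", "01000010", "10001001", "11111101", "00111001", "10110001", "00000101", "11000101",
--     "11110110", "01001011", "11000001", "01111110", "00001000", "00111011", "10111111", "00101011",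
--     "00000011", "11001111", "11010011", "10110110", "00000100", "00111100", "10101100", "10000101",
--     "11011111", "11100000", "00101000", "11111110", "01101111", "10010000", "01001111", "00011110",
--     "01010000", "10000100", "11010001", "10011111", "00101001", "10011000", "01000100", "11100110",
--     "10001110", "00010100", "10000011", "11101100", "10000111", "00111000", "01011111", "00010111",
--     "00010011", "11010111", "10111000", "11110100", "00010101", "10001011", "00010001", "00111110",
--     "00110000", "01010111", "10100100", "01101000", "01000111", "01000110", "01001001", "00110101",
--     "01011011", "10010011", "01010011", "00001100", "01110010", "10110010", "10100101", "11011101",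
--     "01101100", "01100100", "00010110", "10000010", "01111010", "00000111", "01111100", "10001100",
--     "11001110", "01011101", "00110111", "01110100", "10010100", "00011010", "01011010", "11101101",
--     "01000011", "01100011", "01011000", "01110111", "11000100", "11000110", "01100010", "11101001",
--     "01111011", "10010110", "00000001", "01110110", "01100001", "00110110", "01011100", "11110000",
--     "11000111", "10110100", "10100111", "11111000", "01110000", "01101101", "10011011", "00001111",
-- )
--
--
-- def DES_Encrypt(msg):
--     return "".join(_CIPHER_TABLE[ord(c)] for c in msg.rstrip())
-- ===== Notes on version B (the rewrite author's own statement) =====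
-- stated objective: faster
-- what changed: Since the key is a fixed constant, the per-character cipher is a fixed bijection on 8-bit blocks; B replaces the entire key schedule, 16-round Feistel loop, permutations and S-boxes with a precomputed 256-entry lookup table, doing one table lookup per character.
import Mathlib
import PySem

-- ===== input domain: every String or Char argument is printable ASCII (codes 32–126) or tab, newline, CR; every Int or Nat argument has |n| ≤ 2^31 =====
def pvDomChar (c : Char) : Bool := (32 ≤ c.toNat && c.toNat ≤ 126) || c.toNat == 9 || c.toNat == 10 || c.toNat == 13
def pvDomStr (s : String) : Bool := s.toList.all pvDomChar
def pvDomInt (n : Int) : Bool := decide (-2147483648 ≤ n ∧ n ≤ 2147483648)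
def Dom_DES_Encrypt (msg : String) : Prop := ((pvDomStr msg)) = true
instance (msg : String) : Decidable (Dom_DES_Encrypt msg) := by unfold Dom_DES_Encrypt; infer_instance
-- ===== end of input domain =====

-- B: the key is a fixed constant, so the per-character cipher is a fixed 8-bit mapping;
-- B is a precomputed 256-entry lookup table (one lookup per character), no rounds at all.

-- ===== PORT A =====
-- format(n, "0{w}b"): binary digits of n, zero-padded on the left to width w (n : Nat here;
-- every formatted value in A is nonnegative). Exact for Nat inputs.
def pvBinFmt (n w : Nat) : List Char :=
  let s := Nat.toDigits 2 n
  List.replicate (w - s.length) '0' ++ s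

-- int(s, 2) for a string of '0'/'1' (all of A's parses are such strings). Exact there.
def pvBinVal (cs : List Char) : Nat :=
  cs.foldl (fun a c => 2 * a + (if c = '1' then 1 else 0)) 0

-- __get_permuted_value: data[i-1] for each i in permutation (indices always in range in A)
def pvPermA (data : List Char) (perm : List Nat) : List Char :=
  perm.map (fun i => data.getD (i - 1) ' ')

-- circular_left_shift
def pvCircShift (num shift size : Nat) : Nat :=
  let b := pvBinFmt num size
  let s := shift % size
  pvBinVal (b.drop s ++ b.take s)

-- __perform_substitution
def pvSubstA (data : List Char) (box : List (List Nat)) : List Char :=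
  let row := pvBinVal [data.getD 0 ' ', data.getD 3 ' ']
  let col := pvBinVal [data.getD 1 ' ', data.getD 2 ' ']
  pvBinFmt ((box.getD row []).getD col 0) 2

-- generate_subkeys
def pvGenSubkeysA (key : Nat) : List (List Char) :=
  let permutedKey := pvPermA (pvBinFmt key 10) [3, 5, 2, 7, 4, 10, 1, 9, 8, 6]
  let st := (List.range 16).foldl
    (fun (st : List (List Char) × List Char) i =>
      let pk := st.2
      let leftHalf := pk.take 5
      let rightHalf := pk.drop 5
      let sh := if i % 2 == 0 then 2 else 1
      let leftHalf := pvBinFmt (pvCircShift (pvBinVal leftHalf) sh 5) 5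
      let rightHalf := pvBinFmt (pvCircShift (pvBinVal rightHalf) sh 5) 5
      let merged := leftHalf ++ rightHalf
      (st.1 ++ [pvPermA merged [6, 3, 7, 4, 8, 5, 10, 9]], merged))
    ([], permutedKey)
  st.1

-- the body of A's inner loop (one round on one block; `last` is k == len(subkeys)-1)
def pvRoundA (key : List Char) (last : Bool) (block : List Char) : List Char :=
  let leftHalf := block.take 4
  let rightHalf := block.drop 4
  let newLeftHalf := rightHalf
  let rightHalf := pvPermA rightHalf [4, 1, 2, 3, 2, 3, 4, 1]
  let temp := Nat.xor (pvBinVal rightHalf) (pvBinVal key)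
  let rightHalf := pvBinFmt temp block.length
  let rightHalf :=
    pvSubstA (rightHalf.take 4) [[1,0,3,2],[3,2,1,0],[0,2,1,3],[3,1,3,2]] ++
    pvSubstA (rightHalf.drop 4) [[0,1,2,3],[2,0,1,3],[3,0,1,0],[2,1,0,3]]
  let rightHalf := pvPermA rightHalf [2, 4, 3, 1]
  let temp := Nat.xor (pvBinVal rightHalf) (pvBinVal leftHalf)
  let newRightHalf := pvBinFmt temp (block.length / 2)
  if last then newRightHalf ++ newLeftHalf else newLeftHalf ++ newRightHalf

-- A's outer round-major loop: for each subkey (counter k), rewrite every block in place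
-- (the in-place writes at the iteration index are a map over the list)
def pvRoundsA (ks : List (List Char)) (k n : Nat) (blocks : List (List Char)) :
    List (List Char) :=
  match ks with
  | [] => blocks
  | key :: rest => pvRoundsA rest (k + 1) n (blocks.map (pvRoundA key (k == n - 1)))

def DES_Encrypt (msg : String) : String :=
  let plaintext := (PySem.Str.rstrip msg).toList
  let subkeys := pvGenSubkeysA 523
  let permutedPlaintext :=
    plaintext.map (fun c => pvPermA (pvBinFmt c.toNat 8) [2, 6, 3, 1, 4, 8, 5, 7])
  let finalBlocks := pvRoundsA subkeys 0 subkeys.length permutedPlaintext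
  -- "".join over the 8-bit blocks
  String.ofList (List.flatten (finalBlocks.map (fun b => pvPermA b [4, 1, 3, 5, 7, 2, 8, 6])))

-- ===== PORT B =====
-- _CIPHER_TABLE: the fixed-key cipher value on every byte 0..255, precomputed offline
def pvCipherTable : List String := [
  "00001010", "11101011", "00100111", "11100010", "10011001", "11100100", "00000110", "01110011",
  "00100010", "10000110", "10100011", "00011000", "10001101", "11111100", "11011001", "00000010",
  "10100000", "00001101", "00101010", "11101111", "10001111", "11110101", "01000001", "00001011",
  "01100101", "00011001", "01011110", "10011110", "01111000", "11111010", "00011011", "00111010",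
  "01010100", "00101101", "10010101", "11011010", "11111001", "11010110", "11000011", "11100101",
  "10100010", "00000000", "10011010", "10001010", "01100000", "00100110", "00100100", "11111111",
  "01001110", "01111001", "10110000", "00110010", "11100011", "10010001", "10101101", "01111101",
  "00100000", "01101010", "00110001", "00111111", "11001010", "11110001", "01111111", "10100110",
  "01010001", "10110011", "10010010", "10111010", "10010111", "00010000", "10001000", "00011100",
  "11101110", "01010101", "11111011", "01010010", "01001100", "10000001", "11010010", "11011000",
  "11110111", "11010101", "00101100", "10101001", "01110101", "00001110", "01110001", "10011101",
  "00011111", "00010010", "11001000", "11011100", "01000000", "00001001", "00101110", "10011100",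
  "01010110", "00011101", "01001010", "11001101", "01001000", "10111101", "01000101", "10101010",
  "10111110", "10110101", "10110111", "00110011", "10100001", "11101010", "00110100", "10101011",
  "11110011", "00100001", "01001101", "11011110", "11001100", "10111011", "01011001", "01100110",
  "11000000", "11010100", "10101110", "00101111", "10111001", "01101011", "00100101", "10101111",
  "11101000", "01101001", "11000010", "01100111", "11011011", "11110010", "11001001", "00111101",
  "11010000", "10000000", "11001011", "11100001", "01101110", "11100111", "00100011", "10101000",
  "10111100", "01000010", "10001001", "11111101", "00111001", "10110001", "00000101", "11000101",
  "11110110", "01001011", "11000001", "01111110", "00001000", "00111011", "10111111", "00101011",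
  "00000011", "11001111", "11010011", "10110110", "00000100", "00111100", "10101100", "10000101",
  "11011111", "11100000", "00101000", "11111110", "01101111", "10010000", "01001111", "00011110",
  "01010000", "10000100", "11010001", "10011111", "00101001", "10011000", "01000100", "11100110",
  "10001110", "00010100", "10000011", "11101100", "10000111", "00111000", "01011111", "00010111",
  "00010011", "11010111", "10111000", "11110100", "00010101", "10001011", "00010001", "00111110",
  "00110000", "01010111", "10100100", "01101000", "01000111", "01000110", "01001001", "00110101",
  "01011011", "10010011", "01010011", "00001100", "01110010", "10110010", "10100101", "11011101",
  "01101100", "01100100", "00010110", "10000010", "01111010", "00000111", "01111100", "10001100",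
  "11001110", "01011101", "00110111", "01110100", "10010100", "00011010", "01011010", "11101101",
  "01000011", "01100011", "01011000", "01110111", "11000100", "11000110", "01100010", "11101001",
  "01111011", "10010110", "00000001", "01110110", "01100001", "00110110", "01011100", "11110000",
  "11000111", "10110100", "10100111", "11111000", "01110000", "01101101", "10011011", "00001111"
]

-- one table lookup per character of msg.rstrip(), joined
def DES_Encrypt_alt (msg : String) : String :=
  String.ofList (List.flatten ((PySem.Str.rstrip msg).toList.map
    (fun c => (pvCipherTable.getD c.toNat "").toList)))

-- ===== PRECONDITION & SPEC =====
def Spec_DES_Encrypt (msg : String) (out : String) : Prop := out = DES_Encrypt_alt msg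
instance (msg : String) (out : String) : Decidable (Spec_DES_Encrypt msg out) := by
  unfold Spec_DES_Encrypt; infer_instance

-- ===== CLAIM (what is proved, stated in full; the proofs are below) =====
def Claim_equal_DES_Encrypt : Prop :=
  ∀ (msg : String), Dom_DES_Encrypt msg → Spec_DES_Encrypt msg (DES_Encrypt msg)

-- ===== LEMMAS AND PROOFS =====

-- the sequence of rounds one single block undergoes in A
def pvRoundsSeqA (ks : List (List Char)) (k n : Nat) (b : List Char) : List Char :=
  match ks with
  | [] => b
  | key :: rest => pvRoundsSeqA rest (k + 1) n (pvRoundA key (k == n - 1) b)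

-- A's round-major loop is the per-block round sequence mapped over the blocks
theorem pvRoundsA_eq_map (ks : List (List Char)) :
    ∀ (k n : Nat) (bs : List (List Char)),
      pvRoundsA ks k n bs = bs.map (pvRoundsSeqA ks k n) := by
  induction ks with
  | nil => intro k n bs; simp [pvRoundsA, pvRoundsSeqA]
  | cons key rest ih =>
    intro k n bs
    simp only [pvRoundsA, pvRoundsSeqA, ih, List.map_map]
    rfl

-- A's whole per-character pipeline (on the character code)
def pvACharN (n : Nat) : List Char :=
  pvPermA
    (pvRoundsSeqA (pvGenSubkeysA 523) 0 (pvGenSubkeysA 523).length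
      (pvPermA (pvBinFmt n 8) [2, 6, 3, 1, 4, 8, 5, 7]))
    [4, 1, 3, 5, 7, 2, 8, 6]

-- A's pipeline agrees with B's table on every character code the domain admits
set_option maxRecDepth 100000 in
set_option maxHeartbeats 4000000 in
theorem pvChar_eq :
    ∀ n ∈ List.range 127, pvACharN n = (pvCipherTable.getD n "").toList := by decide

theorem pv_mem_rstrip {c : Char} {s : String}
    (h : c ∈ (PySem.Str.rstrip s).toList) : c ∈ s.toList := by
  rw [PySem.Str.toList_rstrip] at h
  unfold PySem.Chars.rstrip at h
  rw [List.mem_reverse] at h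
  have := (List.dropWhile_sublist (l := s.toList.reverse)
    (p := PySem.Chars.isspace)).mem h
  rwa [List.mem_reverse] at this

-- ===== VERDICT (by name: the statement is the Claim_ definition above) =====
theorem DES_Encrypt_spec : Claim_equal_DES_Encrypt := by
  intro msg hdom
  unfold Spec_DES_Encrypt DES_Encrypt DES_Encrypt_alt
  simp only [pvRoundsA_eq_map, List.map_map]
  congr 1
  apply congrArg
  apply List.map_congr_left
  intro c hc
  have hdomc : pvDomChar c = true := by
    have := pv_mem_rstrip hc
    unfold Dom_DES_Encrypt pvDomStr at hdom
    exact List.all_eq_true.mp hdom c this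
  have hlt : c.toNat ∈ List.range 127 := by
    simp only [pvDomChar, Bool.or_eq_true, Bool.and_eq_true, decide_eq_true_eq,
      beq_iff_eq] at hdomc
    simp only [List.mem_range]
    omega
  have := pvChar_eq c.toNat hlt
  simpa [pvACharN, Function.comp] using this
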